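-- pv_equiv track=rewrite | github.com/NX-Whamza/noc-configmaker | vm_deployment/ftth_renderer.py | _normalize_ftth_output
-- ===== SOURCE A (Python) =====
-- def _normalize_ftth_output(config: str) -> str:
--     """Normalize FTTH output to legacy RouterOS CLI section syntax."""
--     # Normalize line endings first to make replacements reliable.
--     normalized = config.replace("\r\n", "\n").replace("\r", "\n")
--     replacements = [
--         ("/interface/bridge/port", "/interface bridge port"),
--         ("/interface/bridge", "/interface bridge"),
--         ("/interface/ethernet", "/interface ethernet"),
--         ("/interface/bonding", "/interface bonding"),
--         ("/interface/vlan", "/interface vlan"),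
--         ("/ip/dhcp-server/network", "/ip dhcp-server network"),
--         ("/ip/dhcp-server", "/ip dhcp-server"),
--         ("/ip/firewall/address-list", "/ip firewall address-list"),
--         ("/ip/firewall/nat", "/ip firewall nat"),
--         ("/ip/firewall/filter", "/ip firewall filter"),
--         ("/ip/firewall/mangle", "/ip firewall mangle"),
--         ("/ip/firewall/raw", "/ip firewall raw"),
--         ("/ip/firewall/service-port", "/ip firewall service-port"),
--         ("/ip/address", "/ip address"),
--         ("/ip/dns", "/ip dns"),
--         ("/routing/ospf/interface-template", "/routing ospf interface-template"),
--         ("/routing/ospf/area", "/routing ospf area"),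
--         ("/routing/ospf/instance", "/routing ospf instance"),
--         ("/routing/bgp/connection", "/routing bgp connection"),
--         ("/routing/bgp/template", "/routing bgp template"),
--         ("/routing/bgp/instance", "/routing bgp instance"),
--         ("/snmp/community", "/snmp community"),
--         ("/system/ntp/client/servers", "/system ntp client servers"),
--         ("/system/ntp/client", "/system ntp client"),
--         ("/system/logging", "/system logging"),
--         ("/system/identity", "/system identity"),
--         ("/system/clock", "/system clock"),
--         ("/system/note", "/system note"),
--         ("/system/routerboard/settings", "/system routerboard settings"),
--     ]
--
--     for old, new in replacements:
--         normalized = normalized.replace(old, new)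
--     return normalized
-- ===== SOURCE B (Python) =====
-- # Paths that FTTH output emits in new-style slash syntax.  Longer paths come
-- # before their prefixes, so a first-match scan picks the longest one.
-- _PATHS = [
--     "/interface/bridge/port",
--     "/interface/bridge",
--     "/interface/ethernet",
--     "/interface/bonding",
--     "/interface/vlan",
--     "/ip/dhcp-server/network",
--     "/ip/dhcp-server",
--     "/ip/firewall/address-list",
--     "/ip/firewall/nat",
--     "/ip/firewall/filter",
--     "/ip/firewall/mangle",
--     "/ip/firewall/raw",
--     "/ip/firewall/service-port",
--     "/ip/address",
--     "/ip/dns",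
--     "/routing/ospf/interface-template",
--     "/routing/ospf/area",
--     "/routing/ospf/instance",
--     "/routing/bgp/connection",
--     "/routing/bgp/template",
--     "/routing/bgp/instance",
--     "/snmp/community",
--     "/system/ntp/client/servers",
--     "/system/ntp/client",
--     "/system/logging",
--     "/system/identity",
--     "/system/clock",
--     "/system/note",
--     "/system/routerboard/settings",
-- ]
--
--
-- def _legacy(path):
--     """Legacy form of a path: keep the leading '/', space out the inner ones."""
--     return "/" + path[1:].replace("/", " ")
--
--
-- def _normalize_ftth_output(config: str) -> str:
--     """Normalize FTTH output to legacy RouterOS CLI section syntax."""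
--     # Normalize line endings first to make replacements reliable.
--     text = config.replace("\r\n", "\n").replace("\r", "\n")
--     # One left-to-right pass: at each '/', rewrite the first known path that
--     # starts here (its legacy form is derived, not tabulated) and jump past it.
--     out = []
--     i = 0
--     n = len(text)
--     while i < n:
--         ch = text[i]
--         if ch == "/":
--             for old in _PATHS:
--                 if text.startswith(old, i):
--                     out.append(_legacy(old))
--                     i += len(old)
--                     break
--             else:
--                 out.append(ch)
--                 i += 1
--         else:
--             out.append(ch)
--             i += 1
--     return "".join(out)
-- ===== Notes on version B (the rewrite author's own statement) =====
-- stated objective: alternative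
-- what changed: A applies 29 sequential full-string str.replace passes over a table of old/new pairs; B keeps only the list of new-style paths, derives each legacy replacement on the fly (leading '/' kept, inner '/' turned into spaces) and rewrites the string in one left-to-right pass, replacing at each slash the first (longest applicable) listed path.
import Mathlib
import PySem

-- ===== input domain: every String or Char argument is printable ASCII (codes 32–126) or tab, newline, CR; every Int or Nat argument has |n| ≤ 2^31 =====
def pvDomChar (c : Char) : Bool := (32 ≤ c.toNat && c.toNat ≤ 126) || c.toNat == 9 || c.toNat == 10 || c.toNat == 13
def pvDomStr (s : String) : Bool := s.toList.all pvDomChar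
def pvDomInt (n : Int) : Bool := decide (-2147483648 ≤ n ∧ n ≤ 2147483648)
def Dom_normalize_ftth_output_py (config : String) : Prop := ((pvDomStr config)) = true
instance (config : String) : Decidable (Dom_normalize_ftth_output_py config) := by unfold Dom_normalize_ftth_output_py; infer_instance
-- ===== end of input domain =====

-- B replaces A's 29 sequential full-string `replace` passes (over a table of old/new pairs) by a
-- single left-to-right scan over a list of paths whose legacy form is DERIVED (inner '/' → ' '),
-- not tabulated (alternative decomposition; same return value, no speed claim).

-- ===== PORT A =====
def replacementsA : List (String × String) := [
  ("/interface/bridge/port", "/interface bridge port"),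
  ("/interface/bridge", "/interface bridge"),
  ("/interface/ethernet", "/interface ethernet"),
  ("/interface/bonding", "/interface bonding"),
  ("/interface/vlan", "/interface vlan"),
  ("/ip/dhcp-server/network", "/ip dhcp-server network"),
  ("/ip/dhcp-server", "/ip dhcp-server"),
  ("/ip/firewall/address-list", "/ip firewall address-list"),
  ("/ip/firewall/nat", "/ip firewall nat"),
  ("/ip/firewall/filter", "/ip firewall filter"),
  ("/ip/firewall/mangle", "/ip firewall mangle"),
  ("/ip/firewall/raw", "/ip firewall raw"),
  ("/ip/firewall/service-port", "/ip firewall service-port"),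
  ("/ip/address", "/ip address"),
  ("/ip/dns", "/ip dns"),
  ("/routing/ospf/interface-template", "/routing ospf interface-template"),
  ("/routing/ospf/area", "/routing ospf area"),
  ("/routing/ospf/instance", "/routing ospf instance"),
  ("/routing/bgp/connection", "/routing bgp connection"),
  ("/routing/bgp/template", "/routing bgp template"),
  ("/routing/bgp/instance", "/routing bgp instance"),
  ("/snmp/community", "/snmp community"),
  ("/system/ntp/client/servers", "/system ntp client servers"),
  ("/system/ntp/client", "/system ntp client"),
  ("/system/logging", "/system logging"),
  ("/system/identity", "/system identity"),
  ("/system/clock", "/system clock"),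
  ("/system/note", "/system note"),
  ("/system/routerboard/settings", "/system routerboard settings")]

def normalize_ftth_output_py (config : String) : String :=
  let normalized := PySem.Str.replace (PySem.Str.replace config "\r\n" "\n") "\r" "\n"
  replacementsA.foldl (fun s p => PySem.Str.replace s p.1 p.2) normalized

-- ===== PORT B =====
-- Source B's `_PATHS`: only the new-style paths; longer paths precede their prefixes.
def pathsB : List String := [
  "/interface/bridge/port",
  "/interface/bridge",
  "/interface/ethernet",
  "/interface/bonding",
  "/interface/vlan",
  "/ip/dhcp-server/network",
  "/ip/dhcp-server",
  "/ip/firewall/address-list",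
  "/ip/firewall/nat",
  "/ip/firewall/filter",
  "/ip/firewall/mangle",
  "/ip/firewall/raw",
  "/ip/firewall/service-port",
  "/ip/address",
  "/ip/dns",
  "/routing/ospf/interface-template",
  "/routing/ospf/area",
  "/routing/ospf/instance",
  "/routing/bgp/connection",
  "/routing/bgp/template",
  "/routing/bgp/instance",
  "/snmp/community",
  "/system/ntp/client/servers",
  "/system/ntp/client",
  "/system/logging",
  "/system/identity",
  "/system/clock",
  "/system/note",
  "/system/routerboard/settings"]

-- Source B's `_legacy`: "/" + path[1:].replace("/", " ")  (path[1:] = drop 1, exact for index 1 ≥ 0)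
def legacyB (p : List Char) : List Char := '/' :: PySem.Chars.replace (p.drop 1) ['/'] [' ']

-- Source B's while-loop: one pass; at '/', the first listed path starting here is replaced by its
-- derived legacy form, else a char is copied.
-- (`max … 1` is only a totality guard for the recursion: every listed path is nonempty.)
def scanB (tbl : List (List Char)) : List Char → List Char
  | [] => []
  | c :: t =>
    if c = '/' then
      match tbl.find? (fun o => o.isPrefixOf (c :: t)) with
      | some o => legacyB o ++ scanB tbl ((c :: t).drop (max o.length 1))
      | none => c :: scanB tbl t
    else c :: scanB tbl t
termination_by s => s.length
decreasing_by
  · simp only [List.length_drop, List.length_cons]; omega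
  · simp
  · simp

def normalize_ftth_output_py_alt (config : String) : String :=
  let text := PySem.Str.replace (PySem.Str.replace config "\r\n" "\n") "\r" "\n"
  String.ofList (scanB (pathsB.map String.toList) text.toList)

-- ===== PRECONDITION & SPEC =====
def Spec_normalize_ftth_output_py (config : String) (out : String) : Prop := out = normalize_ftth_output_py_alt config
instance (config : String) (out : String) : Decidable (Spec_normalize_ftth_output_py config out) := by unfold Spec_normalize_ftth_output_py; infer_instance

-- ===== CLAIM (what is proved, stated in full; the proofs are below) =====
def Claim_equal_normalize_ftth_output_py : Prop := ∀ (config : String), Dom_normalize_ftth_output_py config → Spec_normalize_ftth_output_py config (normalize_ftth_output_py config)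

-- ===== LEMMAS AND PROOFS =====

-- the pattern/replacement pairs Port B's scan effectively uses
def pairsL : List (List Char × List Char) := (pathsB.map String.toList).map (fun o => (o, legacyB o))

-- A's table and B's derived pairs are the same pairs
lemma pairs_agree : replacementsA.map (fun p => (p.1.toList, p.2.toList)) = pairsL := by decide

-- pair-level scanner: proof-side restatement of scanB carrying the replacement in the table
def scanP (tbl : List (List Char × List Char)) : List Char → List Char
  | [] => []
  | c :: t =>
    if c = '/' then
      match tbl.find? (fun p => p.1.isPrefixOf (c :: t)) with
      | some (o, n) => n ++ scanP tbl ((c :: t).drop (max o.length 1))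
      | none => c :: scanP tbl t
    else c :: scanP tbl t
termination_by s => s.length
decreasing_by
  · simp only [List.length_drop, List.length_cons]; omega
  · simp
  · simp

-- clean recursion equivalent to Python str.replace for a nonempty needle
def myRep (old new : List Char) : List Char → List Char
  | [] => []
  | c :: t =>
    if old.isPrefixOf (c :: t) then new ++ myRep old new ((c :: t).drop (max old.length 1))
    else c :: myRep old new t
termination_by s => s.length
decreasing_by
  · simp only [List.length_drop, List.length_cons]; omega
  · simp

-- ---- decidable facts about the concrete table (Bool form, checked by the kernel) ----
lemma factNEB : (pairsL.all fun p => !p.1.isEmpty) = true := by decide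
lemma factSlashB : (pairsL.all fun p => p.1.head? == some '/') = true := by decide
-- no proper tail of a path is prefix-comparable with any path or any replacement
set_option maxHeartbeats 8000000 in
lemma factTailB : (pairsL.all fun p => (List.range p.1.length).all fun j =>
    decide (j = 0) || (pairsL.all fun q =>
      !(p.1.drop j).isPrefixOf q.1 && !q.1.isPrefixOf (p.1.drop j) &&
      (!(p.1.drop j).isPrefixOf q.2 && !q.2.isPrefixOf (p.1.drop j)))) = true := by decide
-- no tail of a replacement is prefix-comparable with any path
set_option maxHeartbeats 8000000 in
lemma factRepB : (pairsL.all fun p => (List.range p.2.length).all fun k => pairsL.all fun q =>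
    !(p.2.drop k).isPrefixOf q.1 && !q.1.isPrefixOf (p.2.drop k)) = true := by decide

-- ---- Prop forms ----
lemma factNE {p : List Char × List Char} (hp : p ∈ pairsL) : p.1 ≠ [] := by
  have h := List.all_eq_true.mp factNEB p hp
  simpa [List.isEmpty_iff] using h

lemma factSlash {p : List Char × List Char} (hp : p ∈ pairsL) : p.1.head? = some '/' := by
  have h := List.all_eq_true.mp factSlashB p hp
  simpa using h

lemma factTailPat {p q : List Char × List Char} (hp : p ∈ pairsL) (hq : q ∈ pairsL)
    {j : ℕ} (hj : j < p.1.length) (hj0 : 0 < j) :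
    ¬ p.1.drop j <+: q.1 ∧ ¬ q.1 <+: p.1.drop j := by
  have h := List.all_eq_true.mp (List.all_eq_true.mp factTailB p hp) j (List.mem_range.mpr hj)
  rcases Bool.or_eq_true _ _ |>.mp h with h | h
  · exact absurd (of_decide_eq_true h) (by omega)
  · have h2 := List.all_eq_true.mp h q hq
    simp only [Bool.and_eq_true, Bool.not_eq_true'] at h2
    exact ⟨fun hc => by simp [List.isPrefixOf_iff_prefix.mpr hc] at h2,
           fun hc => by simp [List.isPrefixOf_iff_prefix.mpr hc] at h2⟩

lemma factTailRep {p q : List Char × List Char} (hp : p ∈ pairsL) (hq : q ∈ pairsL)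
    {j : ℕ} (hj : j < p.1.length) (hj0 : 0 < j) :
    ¬ p.1.drop j <+: q.2 ∧ ¬ q.2 <+: p.1.drop j := by
  have h := List.all_eq_true.mp (List.all_eq_true.mp factTailB p hp) j (List.mem_range.mpr hj)
  rcases Bool.or_eq_true _ _ |>.mp h with h | h
  · exact absurd (of_decide_eq_true h) (by omega)
  · have h2 := List.all_eq_true.mp h q hq
    simp only [Bool.and_eq_true, Bool.not_eq_true'] at h2
    exact ⟨fun hc => by simp [List.isPrefixOf_iff_prefix.mpr hc] at h2,
           fun hc => by simp [List.isPrefixOf_iff_prefix.mpr hc] at h2⟩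

lemma factRepPat {p q : List Char × List Char} (hp : p ∈ pairsL) (hq : q ∈ pairsL)
    {k : ℕ} (hk : k < p.2.length) :
    ¬ p.2.drop k <+: q.1 ∧ ¬ q.1 <+: p.2.drop k := by
  have h := List.all_eq_true.mp (List.all_eq_true.mp
    (List.all_eq_true.mp factRepB p hp) k (List.mem_range.mpr hk)) q hq
  simp only [Bool.and_eq_true, Bool.not_eq_true'] at h
  exact ⟨fun hc => by simp [List.isPrefixOf_iff_prefix.mpr hc] at h,
         fun hc => by simp [List.isPrefixOf_iff_prefix.mpr hc] at h⟩

-- ---- myRep equations ----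
lemma myRep_nil (old new : List Char) : myRep old new [] = [] := by simp [myRep]

lemma myRep_cons_pos {old : List Char} (new : List Char) {c : Char} {t : List Char}
    (h : old <+: c :: t) (h0 : old ≠ []) :
    myRep old new (c :: t) = new ++ myRep old new ((c :: t).drop old.length) := by
  have hmax : max old.length 1 = old.length := by
    have := List.length_pos_iff.mpr h0; omega
  rw [myRep, if_pos (List.isPrefixOf_iff_prefix.mpr h), hmax]

lemma myRep_cons_neg {old : List Char} (new : List Char) {c : Char} {t : List Char}
    (h : ¬ old <+: c :: t) :
    myRep old new (c :: t) = c :: myRep old new t := by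
  rw [myRep, if_neg (fun hc => h (List.isPrefixOf_iff_prefix.mp hc))]

-- ---- Python str.replace agrees with myRep for a nonempty needle ----
lemma go_eq_myRep {old : List Char} (new : List Char) (h0 : old ≠ []) :
    ∀ (fuel : ℕ) (l acc : List Char), l.length ≤ fuel →
      PySem.Chars.replace.go old new fuel l acc = acc.reverse ++ myRep old new l := by
  intro fuel
  induction fuel with
  | zero =>
    intro l acc hl
    have : l = [] := by cases l <;> simp_all
    subst this
    rw [PySem.Chars.replace.go.eq_def]
    simp [myRep_nil]
  | succ N ih =>
    intro l acc hl
    cases l with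
    | nil => rw [PySem.Chars.replace.go.eq_def]; simp [myRep_nil]
    | cons c t =>
      have hol := List.length_pos_iff.mpr h0
      rw [PySem.Chars.replace.go.eq_def]
      simp only []
      by_cases hp : old.isPrefixOf (c :: t) = true
      · rw [if_pos hp]
        have hdrop : (List.drop old.length (c :: t)).length ≤ N := by
          simp only [List.length_drop, List.length_cons]
          simp only [List.length_cons] at hl
          omega
        rw [ih _ _ hdrop, myRep_cons_pos new (List.isPrefixOf_iff_prefix.mp hp) h0]
        simp
      · rw [if_neg hp]
        have ht : t.length ≤ N := by simp only [List.length_cons] at hl; omega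
        rw [ih _ _ ht, myRep_cons_neg new (fun hc => hp (List.isPrefixOf_iff_prefix.mpr hc))]
        simp

lemma replace_eq_myRep {old : List Char} (new : List Char) (h0 : old ≠ []) (s : List Char) :
    PySem.Chars.replace s old new = myRep old new s := by
  rw [PySem.Chars.replace]
  rw [if_neg (by simp [List.isEmpty_iff, h0])]
  simpa using go_eq_myRep new h0 s.length s [] le_rfl

-- ---- myRep structure lemmas ----
lemma myRep_append (old new : List Char) :
    ∀ (x u : List Char), (∀ k, k < x.length → ¬ old <+: (x.drop k ++ u)) →
      myRep old new (x ++ u) = x ++ myRep old new u := by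
  intro x
  induction x with
  | nil => intro u _; simp
  | cons c x' ih =>
    intro u h
    rw [List.cons_append, myRep_cons_neg new (by simpa using h 0 (by simp)),
      ih u (fun k hk => by simpa using h (k + 1) (by simp only [List.length_cons]; omega))]
    simp

lemma myRep_prefix {old : List Char} {new : List Char} (h0 : old ≠ []) {e : List Char}
    (hNC : ∀ k, k < e.length → ¬ e.drop k <+: new ∧ ¬ new <+: e.drop k) :
    ∀ u, e <+: myRep old new u → e <+: u := by
  suffices H : ∀ (N : ℕ) (e : List Char),
      (∀ k, k < e.length → ¬ e.drop k <+: new ∧ ¬ new <+: e.drop k) →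
      ∀ u, u.length ≤ N → e <+: myRep old new u → e <+: u by
    exact fun u => H u.length e hNC u le_rfl
  intro N
  induction N with
  | zero =>
    intro e _ u hu he
    have : u = [] := by cases u <;> simp_all
    subst this
    rw [myRep_nil] at he
    simpa [List.prefix_nil] using he
  | succ N ih =>
    intro e hNC u hu he
    cases u with
    | nil =>
      rw [myRep_nil] at he
      simpa [List.prefix_nil] using he
    | cons c t =>
      by_cases hp : old <+: c :: t
      · rw [myRep_cons_pos new hp h0] at he
        cases e with
        | nil => exact List.nil_prefix
        | cons e0 e' =>
          rcases List.prefix_or_prefix_of_prefix he (List.prefix_append new _) with h1 | h1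
          · exact absurd h1 (by simpa using (hNC 0 (by simp)).1)
          · exact absurd h1 (by simpa using (hNC 0 (by simp)).2)
      · rw [myRep_cons_neg new hp] at he
        rcases List.prefix_cons_iff.mp he with rfl | ⟨e', rfl, he'⟩
        · exact List.nil_prefix
        · have hNC' : ∀ k, k < e'.length → ¬ e'.drop k <+: new ∧ ¬ new <+: e'.drop k := by
            intro k hk
            simpa using hNC (k + 1) (by simp only [List.length_cons]; omega)
          have ht : t.length ≤ N := by simp only [List.length_cons] at hu; omega
          exact List.cons_prefix_cons.mpr ⟨rfl, ih e' hNC' t ht he'⟩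

-- ---- scanP equations ----
lemma scanP_nil (tbl : List (List Char × List Char)) : scanP tbl [] = [] := by simp [scanP]

lemma scanP_pos {tbl : List (List Char × List Char)} {s o n : List Char}
    (hfind : tbl.find? (fun p => p.1.isPrefixOf s) = some (o, n))
    (ho : o ≠ []) (hh : o.head? = some '/') :
    scanP tbl s = n ++ scanP tbl (s.drop o.length) := by
  have hpref : o <+: s := by
    have h := List.find?_some hfind
    simpa [List.isPrefixOf_iff_prefix] using h
  cases s with
  | nil =>
    rw [List.prefix_nil] at hpref
    exact absurd hpref ho
  | cons c t =>
    cases o with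
    | nil => exact absurd rfl ho
    | cons o0 o' =>
      obtain rfl : o0 = '/' := by simpa using hh
      obtain rfl : c = '/' := ((List.cons_prefix_cons.mp hpref).1).symm
      have hmax : max ('/' :: o').length 1 = ('/' :: o').length := by
        simp only [List.length_cons]; omega
      rw [scanP, if_pos rfl, hfind]
      show n ++ scanP tbl (List.drop (max ('/' :: o').length 1) ('/' :: t)) = _
      rw [hmax]

lemma scanP_cons_none {tbl : List (List Char × List Char)} {c : Char} {t : List Char}
    (hfind : tbl.find? (fun p => p.1.isPrefixOf (c :: t)) = none) :
    scanP tbl (c :: t) = c :: scanP tbl t := by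
  by_cases hc : c = '/'
  · subst hc
    rw [scanP, if_pos rfl, hfind]
  · rw [scanP, if_neg hc]

lemma scanP_emptyTbl : ∀ s : List Char, scanP [] s = s := by
  intro s
  induction s with
  | nil => exact scanP_nil []
  | cons c t ih => rw [scanP_cons_none rfl, ih]

lemma scanP_skip (tbl : List (List Char × List Char)) :
    ∀ (x u : List Char), (∀ k, k < x.length → ∀ p ∈ tbl, ¬ p.1 <+: (x.drop k ++ u)) →
      scanP tbl (x ++ u) = x ++ scanP tbl u := by
  intro x
  induction x with
  | nil => intro u _; simp
  | cons c x' ih =>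
    intro u h
    have hfind : tbl.find? (fun p => p.1.isPrefixOf (c :: (x' ++ u))) = none := by
      rw [List.find?_eq_none]
      intro p hp hc
      exact h 0 (by simp) p hp (by simpa using List.isPrefixOf_iff_prefix.mp hc)
    rw [List.cons_append, scanP_cons_none hfind,
      ih u (fun k hk => by simpa using h (k + 1) (by simp only [List.length_cons]; omega))]
    simp

-- find? is stable when replacing the part after the match
lemma find_stable {ps : List (List Char × List Char)} {s s' o n : List Char}
    (hfind : ps.find? (fun r => r.1.isPrefixOf s) = some (o, n))
    (hpos : o <+: s')
    (hkeep : ∀ r ∈ ps, r.1 <+: s' → r.1 <+: s) :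
    ps.find? (fun r => r.1.isPrefixOf s') = some (o, n) := by
  induction ps with
  | nil => simp at hfind
  | cons r rs ih =>
    by_cases hr : r.1 <+: s
    · rw [List.find?_cons_of_pos (by simpa [List.isPrefixOf_iff_prefix] using hr)] at hfind
      obtain rfl : r = (o, n) := by simpa using hfind
      exact List.find?_cons_of_pos (by simpa [List.isPrefixOf_iff_prefix] using hpos)
    · have hr' : ¬ r.1 <+: s' := fun hc => hr (hkeep r List.mem_cons_self hc)
      rw [List.find?_cons_of_neg (by simpa [List.isPrefixOf_iff_prefix] using hr)] at hfind
      rw [List.find?_cons_of_neg (by simpa [List.isPrefixOf_iff_prefix] using hr')]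
      exact ih hfind (fun x hx => hkeep x (List.mem_cons_of_mem r hx))

-- the key step: putting one replacement pass in front of the scanner
lemma stepL (a : List Char × List Char) (ha : a ∈ pairsL)
    (ps : List (List Char × List Char)) (hps : ∀ x ∈ ps, x ∈ pairsL) :
    ∀ s : List Char, scanP (a :: ps) s = scanP ps (myRep a.1 a.2 s) := by
  suffices H : ∀ (N : ℕ) (s : List Char), s.length ≤ N →
      scanP (a :: ps) s = scanP ps (myRep a.1 a.2 s) from fun s => H s.length s le_rfl
  have haNE : a.1 ≠ [] := factNE ha
  have haPos : 0 < a.1.length := List.length_pos_iff.mpr haNE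
  intro N
  induction N with
  | zero =>
    intro s hs
    have : s = [] := by cases s <;> simp_all
    subst this
    rw [scanP_nil, myRep_nil, scanP_nil]
  | succ N ih =>
    intro s hs
    cases s with
    | nil => rw [scanP_nil, myRep_nil, scanP_nil]
    | cons c t =>
      by_cases hpm : a.1 <+: c :: t
      · have hfind : (a :: ps).find? (fun r => r.1.isPrefixOf (c :: t)) = some (a.1, a.2) := by
          rw [show ((a.1, a.2) : List Char × List Char) = a from rfl]
          exact List.find?_cons_of_pos (by simpa [List.isPrefixOf_iff_prefix] using hpm)
        rw [scanP_pos hfind haNE (factSlash ha), myRep_cons_pos a.2 hpm haNE]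
        rw [scanP_skip ps a.2 _ ?skip]
        case skip =>
          intro k hk r hr hcontra
          rcases List.prefix_or_prefix_of_prefix hcontra
            (List.prefix_append (a.2.drop k) _) with h1 | h1
          · exact (factRepPat ha (hps r hr) hk).2 h1
          · exact (factRepPat ha (hps r hr) hk).1 h1
        congr 1
        exact ih _ (by simp only [List.length_drop, List.length_cons] at *; omega)
      · have hfind1 : (a :: ps).find? (fun r => r.1.isPrefixOf (c :: t))
            = ps.find? (fun r => r.1.isPrefixOf (c :: t)) :=
          List.find?_cons_of_neg (by simpa [List.isPrefixOf_iff_prefix] using hpm)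
        rcases hq : ps.find? (fun r => r.1.isPrefixOf (c :: t)) with _ | ⟨o, n⟩
        · rw [scanP_cons_none (hfind1.trans hq), myRep_cons_neg a.2 hpm]
          have hfind2 : ps.find? (fun r => r.1.isPrefixOf (c :: myRep a.1 a.2 t)) = none := by
            rw [List.find?_eq_none]
            intro r hr hcontra
            have hpref : r.1 <+: c :: myRep a.1 a.2 t :=
              List.isPrefixOf_iff_prefix.mp hcontra
            have hrP := hps r hr
            rcases List.prefix_cons_iff.mp hpref with h0 | ⟨e', hr1, he'⟩
            · exact factNE hrP h0
            · have hrlen : r.1.length = e'.length + 1 := by rw [hr1]; simp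
              have he : e' <+: t := by
                refine myRep_prefix haNE (fun k hk => ?_) t he'
                have : e'.drop k = r.1.drop (k + 1) := by rw [hr1]; rfl
                rw [this]
                exact factTailRep hrP ha (by omega) (by omega)
              have : r.1 <+: c :: t := by
                rw [hr1]; exact List.cons_prefix_cons.mpr ⟨rfl, he⟩
              exact (List.find?_eq_none.mp hq r hr)
                (List.isPrefixOf_iff_prefix.mpr this)
          rw [scanP_cons_none hfind2]
          have ht := ih t (by simp only [List.length_cons] at hs; omega)
          rw [ht]
        · have honMem := List.mem_of_find?_eq_some hq
          have honP := hps _ honMem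
          have hoNE : o ≠ [] := factNE honP
          have hoPos : 0 < o.length := List.length_pos_iff.mpr hoNE
          have hopref : o <+: c :: t := by
            have h := List.find?_some hq
            simpa [List.isPrefixOf_iff_prefix] using h
          have hsplit : o ++ (c :: t).drop o.length = c :: t :=
            List.prefix_iff_eq_append.mp hopref
          set u := (c :: t).drop o.length with hu
          have hulen : u.length ≤ N := by
            rw [hu]; simp only [List.length_drop, List.length_cons]
            simp only [List.length_cons] at hs; omega
          have hrep : myRep a.1 a.2 (c :: t) = o ++ myRep a.1 a.2 u := by
            rw [← hsplit]
            refine myRep_append a.1 a.2 o u (fun k hk hcontra => ?_)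
            rcases Nat.eq_zero_or_pos k with rfl | hkpos
            · rw [List.drop_zero, hsplit] at hcontra
              exact hpm hcontra
            · rcases List.prefix_or_prefix_of_prefix hcontra
                (List.prefix_append (o.drop k) _) with h1 | h1
              · exact (factTailPat honP ha hk hkpos).2 h1
              · exact (factTailPat honP ha hk hkpos).1 h1
          rw [hrep]
          set Y := myRep a.1 a.2 u with hY
          have hfindY : ps.find? (fun r => r.1.isPrefixOf (o ++ Y)) = some (o, n) := by
            refine find_stable hq (List.prefix_append o Y) (fun r hr hpre => ?_)
            have hrP := hps r hr
            rcases List.prefix_or_prefix_of_prefix hpre (List.prefix_append o Y) with h1 | h1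
            · exact h1.trans (hsplit ▸ List.prefix_append o ((c :: t).drop o.length))
            · have hext : o ++ r.1.drop o.length = r.1 := List.prefix_iff_eq_append.mp h1
              have hextY : r.1.drop o.length <+: Y := by
                have h2 : o ++ r.1.drop o.length <+: o ++ Y := by rw [hext]; exact hpre
                exact (List.prefix_append_right_inj o).mp h2
              have hextu : r.1.drop o.length <+: u := by
                refine myRep_prefix haNE (fun k hk => ?_) u hextY
                have hdd : (r.1.drop o.length).drop k = r.1.drop (o.length + k) := by
                  rw [List.drop_drop]
                rw [hdd]
                have hklen : o.length + k < r.1.length := by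
                  have := List.length_drop (l := r.1) (i := o.length)
                  omega
                exact factTailRep hrP ha hklen (by omega)
              calc r.1 = o ++ r.1.drop o.length := hext.symm
                _ <+: o ++ u := (List.prefix_append_right_inj o).mpr hextu
                _ = c :: t := hsplit
          have hLHS : scanP (a :: ps) (c :: t) = n ++ scanP (a :: ps) u := by
            rw [scanP_pos (hfind1.trans hq) hoNE (factSlash honP)]
          rw [hLHS, scanP_pos hfindY hoNE (factSlash honP), List.drop_left]
          rw [ih u hulen]

lemma chainL : ∀ (ll : List (List Char × List Char)), (∀ x ∈ ll, x ∈ pairsL) →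
    ∀ s : List Char, scanP ll s = ll.foldl (fun cs p => myRep p.1 p.2 cs) s := by
  intro ll
  induction ll with
  | nil => intro _ s; simpa using scanP_emptyTbl s
  | cons a ps ih =>
    intro h s
    rw [List.foldl_cons,
      stepL a (h a List.mem_cons_self) ps (fun x hx => h x (List.mem_cons_of_mem a hx)),
      ih (fun x hx => h x (List.mem_cons_of_mem a hx))]

-- ---- Port B's path scanner equals the pair scanner over the derived pairs ----
lemma scanB_eq_scanP (tbl : List (List Char)) :
    ∀ s : List Char, scanB tbl s = scanP (tbl.map (fun o => (o, legacyB o))) s := by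
  suffices H : ∀ (N : ℕ) (s : List Char), s.length ≤ N →
      scanB tbl s = scanP (tbl.map (fun o => (o, legacyB o))) s from fun s => H s.length s le_rfl
  intro N
  induction N with
  | zero =>
    intro s hs
    have : s = [] := by cases s <;> simp_all
    subst this
    rw [scanP_nil]; simp [scanB]
  | succ N ih =>
    intro s hs
    cases s with
    | nil => rw [scanP_nil]; simp [scanB]
    | cons c t =>
      have hfind : (tbl.map (fun o => (o, legacyB o))).find? (fun p => p.1.isPrefixOf (c :: t))
          = (tbl.find? (fun o => o.isPrefixOf (c :: t))).map (fun o => (o, legacyB o)) := by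
        rw [List.find?_map]; rfl
      by_cases hc : c = '/'
      · subst hc
        rcases hq : tbl.find? (fun o => o.isPrefixOf ('/' :: t)) with _ | o
        · rw [scanB, if_pos rfl, hq, scanP, if_pos rfl, hfind, hq]
          exact congrArg _ (ih t (by simp only [List.length_cons] at hs; omega))
        · rw [scanB, if_pos rfl, hq, scanP, if_pos rfl, hfind, hq]
          show legacyB o ++ scanB tbl _ = legacyB o ++ scanP _ _
          exact congrArg _ (ih _ (by
            simp only [List.length_drop, List.length_cons] at *; omega))
      · rw [scanB, if_neg hc, scanP, if_neg hc]
        exact congrArg _ (ih t (by simp only [List.length_cons] at hs; omega))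

-- ---- String-level assembly ----
lemma foldl_toList (l : List (String × String)) :
    ∀ s : String, (l.foldl (fun s p => PySem.Str.replace s p.1 p.2) s).toList
      = l.foldl (fun cs (p : String × String) => PySem.Chars.replace cs p.1.toList p.2.toList) s.toList := by
  induction l with
  | nil => intro s; simp
  | cons p l ih =>
    intro s
    rw [List.foldl_cons, List.foldl_cons, ih, PySem.Str.toList_replace]

lemma foldl_rep : ∀ (ll : List (List Char × List Char)), (∀ x ∈ ll, x.1 ≠ []) →
    ∀ cs : List Char, ll.foldl (fun cs p => PySem.Chars.replace cs p.1 p.2) cs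
      = ll.foldl (fun cs p => myRep p.1 p.2 cs) cs := by
  intro ll
  induction ll with
  | nil => intro _ _; rfl
  | cons p l ih =>
    intro h cs
    rw [List.foldl_cons, List.foldl_cons, replace_eq_myRep _ (h p List.mem_cons_self),
      ih (fun x hx => h x (List.mem_cons_of_mem p hx))]

-- ===== VERDICT (by name: the statement is the Claim_ definition above) =====
theorem normalize_ftth_output_py_spec : Claim_equal_normalize_ftth_output_py := by
  unfold Claim_equal_normalize_ftth_output_py
  intro config _
  unfold Spec_normalize_ftth_output_py normalize_ftth_output_py normalize_ftth_output_py_alt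
  apply String.toList_inj.mp
  rw [String.toList_ofList, foldl_toList]
  rw [List.foldl_map
    (f := fun (p : String × String) => (p.1.toList, p.2.toList))
    (g := fun cs (p : List Char × List Char) => PySem.Chars.replace cs p.1 p.2) |>.symm]
  rw [pairs_agree, foldl_rep pairsL (fun x hx => factNE hx),
    scanB_eq_scanP (pathsB.map String.toList)]
  exact (chainL pairsL (fun x hx => hx) _).symm
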